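-- pv_equiv track=rewrite | github.com/DinisRosa/ATP_LEBIOM | projeto/projeto/Functions/DataSet_Subdivision.py | all_KeyWords
-- ===== SOURCE A (Python) =====
-- def all_KeyWords(base: list) -> dict:
--     KeyWordsDict: dict[str, list[int]] = {}
--     for i, pub in enumerate(base):
--         if 'keywords' in pub.keys():
--             pubKeyWords: list[str] = ''.join(char for char in pub['keywords'] if char not in '!.?').split(',')
--             for key in pubKeyWords:
--                 if key[0] == ' ':
--                     key = key[1:]
--                 if key not in KeyWordsDict:
--                     KeyWordsDict[key] = [i]
--                 else:
--                     KeyWordsDict[key].append(i)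
--     return {k: KeyWordsDict[k] for k in sorted(KeyWordsDict)}
-- ===== SOURCE B (Python) =====
-- def all_KeyWords(base: list) -> dict:
--     # stage 1: one char-level scan per publication, emitting (keyword, index) pairs
--     # (drops '!.?', splits on ',', strips one leading space)
--     pairs = []
--     for i, pub in enumerate(base):
--         if 'keywords' in pub:
--             cur = ''
--             for ch in pub['keywords'] + ',':
--                 if ch == ',':
--                     pairs.append((cur[1:] if cur[:1] == ' ' else cur, i))
--                     cur = ''
--                 elif ch not in '!.?':
--                     cur += ch
--     # stage 2: stable sort by keyword, then group consecutive runs of equal keywords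
--     pairs.sort(key=lambda p: p[0])
--     result = {}
--     j = 0
--     while j < len(pairs):
--         k = pairs[j][0]
--         idxs = []
--         while j < len(pairs) and pairs[j][0] == k:
--             idxs.append(pairs[j][1])
--             j += 1
--         result[k] = idxs
--     return result
-- ===== Notes on version B (the rewrite author's own statement) =====
-- stated objective: alternative
-- what changed: A joins/filters/splits each keywords string and grows a dict incrementally with a membership branch per key; B does a single character-level scan per publication emitting flat (keyword, index) pairs, then stably sorts the pairs by keyword and groups consecutive equal keywords into the result.
-- crash fix: On inputs where some publication's cleaned keywords string has an empty comma-separated piece, A raises IndexError on key[0]; B returns the grouping with that empty-string keyword included. — e.g. on all_KeyWords([[("keywords", "ai,,ml")]]): A raises IndexError, B returns [("", [0]), ("ai", [0]), ("ml", [0])]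
import Mathlib
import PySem

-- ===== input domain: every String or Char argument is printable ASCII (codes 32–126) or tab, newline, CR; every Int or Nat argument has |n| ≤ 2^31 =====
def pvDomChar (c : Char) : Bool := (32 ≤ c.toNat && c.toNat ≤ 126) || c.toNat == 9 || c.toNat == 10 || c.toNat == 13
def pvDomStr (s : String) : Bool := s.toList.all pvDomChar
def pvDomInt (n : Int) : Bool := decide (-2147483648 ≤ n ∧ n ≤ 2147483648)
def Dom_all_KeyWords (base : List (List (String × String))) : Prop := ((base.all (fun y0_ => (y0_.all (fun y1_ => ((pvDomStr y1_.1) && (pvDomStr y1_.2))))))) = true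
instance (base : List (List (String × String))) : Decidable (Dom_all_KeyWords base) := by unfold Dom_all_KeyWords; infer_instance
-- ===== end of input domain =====

-- B replaces A's per-string filter/split plus incremental dict grouping by a char-level scan
-- collecting flat (keyword, index) pairs, then a stable sort by keyword and a grouping pass
-- over consecutive equal keywords (objective: alternative; return value only).

-- ===== PORT A =====
-- ''.join(char for char in pub['keywords'] if char not in '!.?')
def pvClean (cs : List Char) : List Char := cs.filter (fun c => !(c == '!' || c == '.' || c == '?'))
-- .split(',')
def pvSplit (kw : String) : List (List Char) := PySem.Chars.splitOn (pvClean kw.toList) [',']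
-- A's "if key[0] == ' ': key = key[1:]"; key[0] on an empty key raises in Python (excluded by Pre_)
def pvStripA (key : List Char) : String :=
  String.ofList (if PySem.List.pyGet? key 0 == some ' ' then PySem.List.slice key (some 1) none else key)

-- the KeyWordsDict A's outer loop has built when the loop ends
def pvDictA (base : List (List (String × String))) : PySem.Dict String (List Int) :=
  (PySem.List.enumerate base).foldl (fun d ip =>
    match ip.2.lookup "keywords" with
    | none => d
    | some kw => (pvSplit kw).foldl (fun d key =>
        let k := pvStripA key
        if d.contains k = false then d.insert k [ip.1]
        else d.modify k [] (fun v => v ++ [ip.1])) d) PySem.Dict.empty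

def all_KeyWords (base : List (List (String × String))) : List (String × List Int) :=
  (PySem.List.sorted (pvDictA base).keys (fun k => k)).map (fun k => (k, (pvDictA base).getD k []))

-- ===== PORT B =====
-- B's inner char loop over pub['keywords'] + ',': state = (pairs so far, current keyword chars);
-- on ',' emit (cur[1:] if cur[:1] == ' ' else cur, i) and reset cur; skip '!.?'; else extend cur
def pvScanStep (i : Int) (st : List (String × Int) × List Char) (ch : Char) : List (String × Int) × List Char :=
  if ch == ',' then
    (st.1 ++ [(String.ofList (if PySem.List.slice st.2 none (some 1) = [' '] then PySem.List.slice st.2 (some 1) none else st.2), i)], [])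
  else if ch == '!' || ch == '.' || ch == '?' then st
  else (st.1, st.2 ++ [ch])

-- B's stage 1: the flat (keyword, publication index) pair list
def pvPairsB (base : List (List (String × String))) : List (String × Int) :=
  (PySem.List.enumerate base).foldl (fun pairs ip =>
    match ip.2.lookup "keywords" with
    | none => pairs
    | some kw => ((kw.toList ++ [',']).foldl (pvScanStep ip.1) (pairs, [])).1) []

-- B's inner while: extend the current group (k, idxs) while the keyword stays k,
-- otherwise close it and start the next group
def pvGroupGo : String → List Int → List (String × Int) → List (String × List Int)
  | k, idxs, [] => [(k, idxs)]
  | k, idxs, (k', i) :: t =>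
      if k' == k then pvGroupGo k (idxs ++ [i]) t else (k, idxs) :: pvGroupGo k' [i] t

-- B's outer while over the sorted pair list
def pvGroup : List (String × Int) → List (String × List Int)
  | [] => []
  | (k, i) :: t => pvGroupGo k [i] t

def all_KeyWords_alt (base : List (List (String × String))) : List (String × List Int) :=
  pvGroup (PySem.List.sorted (pvPairsB base) (fun p => p.1))

-- ===== PRECONDITION & SPEC =====
-- Pre_ excludes exactly the inputs where some publication's cleaned keywords string has an empty
-- comma-separated piece: there Python A raises IndexError on key[0] (A returns no value).
def Pre_all_KeyWords (base : List (List (String × String))) : Prop :=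
  (base.all (fun pub => match pub.lookup "keywords" with
    | some kw => !(pvSplit kw).contains []
    | none => true)) = true
instance (base : List (List (String × String))) : Decidable (Pre_all_KeyWords base) := by
  unfold Pre_all_KeyWords; infer_instance
def pvWitness_all_KeyWords : (List (List (String × String))) := [[("keywords", "ai, ml!"), ("title", "t")], [("keywords", "ml")]]

-- On inputs where some publication's cleaned keywords string has an empty comma-separated piece,
-- A raises IndexError on key[0]; B returns the grouping with that empty-string keyword included.
def Raises_all_KeyWords (base : List (List (String × String))) : Prop :=
  (base.any (fun pub => match pub.lookup "keywords" with
    | some kw => (pvSplit kw).contains []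
    | none => false)) = true
instance (base : List (List (String × String))) : Decidable (Raises_all_KeyWords base) := by
  unfold Raises_all_KeyWords; infer_instance
def pvRaiseWitness_all_KeyWords : (List (List (String × String))) := [[("keywords", "ai,,ml")]]
def pvRaiseWitnessOut_all_KeyWords : List (String × List Int) := [("", [0]), ("ai", [0]), ("ml", [0])]

def Spec_all_KeyWords (base : List (List (String × String))) (out : List (String × List Int)) : Prop := out = all_KeyWords_alt base
instance (base : List (List (String × String))) (out : List (String × List Int)) : Decidable (Spec_all_KeyWords base out) := by unfold Spec_all_KeyWords; infer_instance

-- ===== CLAIM (what is proved, stated in full; the proofs are below) =====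
def Claim_equal_all_KeyWords : Prop := ∀ (base : List (List (String × String))), Dom_all_KeyWords base → Pre_all_KeyWords base → Spec_all_KeyWords base (all_KeyWords base)
def Claim_raises_all_KeyWords : Prop := (∀ (base : List (List (String × String))), Dom_all_KeyWords base → Raises_all_KeyWords base → ¬ Pre_all_KeyWords base) ∧ (Dom_all_KeyWords (pvRaiseWitness_all_KeyWords) ∧ Raises_all_KeyWords (pvRaiseWitness_all_KeyWords) ∧ all_KeyWords_alt (pvRaiseWitness_all_KeyWords) = pvRaiseWitnessOut_all_KeyWords)

-- ===== LEMMAS AND PROOFS =====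

-- the flat (keyword, index) list, in A's terms
def pvPairs (base : List (List (String × String))) : List (String × Int) :=
  (PySem.List.enumerate base).flatMap (fun ip =>
    match ip.2.lookup "keywords" with
    | none => []
    | some kw => (pvSplit kw).map (fun key => (pvStripA key, ip.1)))

-- recursive single-char-separator split (proof-only reference form of splitOn · [','])
def pvSplit1 (pre : List Char) : List Char → List (List Char)
  | [] => [pre]
  | x :: xs => if x = ',' then pre :: pvSplit1 [] xs else pvSplit1 (pre ++ [x]) xs

theorem splitOn_go_comma (l : List Char) : ∀ (fuel : Nat) (cur : List Char) (acc : List (List Char)),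
    l.length < fuel →
    PySem.Chars.splitOn.go [','] fuel l cur acc = acc.reverse ++ pvSplit1 cur.reverse l := by
  induction l with
  | nil =>
      intro fuel cur acc h
      match fuel, h with
      | fuel+1, _ => simp [PySem.Chars.splitOn.go, pvSplit1]
  | cons c rest ih =>
      intro fuel cur acc h
      match fuel, h with
      | fuel+1, h =>
        by_cases hc : c = ','
        · subst hc
          have hpre : List.isPrefixOf [','] (',' :: rest) = true := by simp [List.isPrefixOf]
          simp only [PySem.Chars.splitOn.go, hpre, if_pos, List.length_cons,
            List.drop_succ_cons, List.drop_zero, List.length_nil]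
          rw [ih fuel [] (cur.reverse :: acc) (by simpa using Nat.lt_of_succ_lt_succ h)]
          simp [pvSplit1]
        · have hpre : List.isPrefixOf [','] (c :: rest) = false := by
            simp [List.isPrefixOf]
            exact fun h => hc h.symm
          simp only [PySem.Chars.splitOn.go, hpre, Bool.false_eq_true, if_false]
          rw [ih fuel (c :: cur) acc (by simpa using Nat.lt_of_succ_lt_succ h)]
          simp [pvSplit1, hc]

theorem splitOn_comma (s : List Char) : PySem.Chars.splitOn s [','] = pvSplit1 [] s := by
  rw [PySem.Chars.splitOn, splitOn_go_comma s (s.length+1) [] [] (Nat.lt_succ_self _)]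
  simp

-- B's strip-of-one-leading-space expression equals A's
theorem pvFix_eq (key : List Char) :
    String.ofList (if PySem.List.slice key none (some 1) = [' '] then PySem.List.slice key (some 1) none else key)
    = pvStripA key := by
  cases key with
  | nil => simp [pvStripA, PySem.List.slice, PySem.List.pyGet?, PySem.List.pyIdx?]
  | cons c t =>
      have h1 : PySem.List.slice (c :: t) none (some 1) = [c] := by
        simp [PySem.List.slice]
      have h2 : PySem.List.pyGet? (c :: t) 0 = some c := by
        simp [PySem.List.pyGet?, PySem.List.pyIdx?]
      simp only [pvStripA, h1, h2]
      by_cases h : c = ' ' <;> simp [h]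

-- B's char scan over cs ++ [','] produces exactly the pairs A's split/strip produces
theorem scan_spec (i : Int) (cs : List Char) : ∀ (pairs : List (String × Int)) (cur : List Char),
    ((cs ++ [',']).foldl (pvScanStep i) (pairs, cur)).1
    = pairs ++ (pvSplit1 cur (pvClean cs)).map (fun k => (pvStripA k, i)) := by
  induction cs with
  | nil =>
      intro pairs cur
      simp [pvScanStep, pvClean, pvSplit1, pvFix_eq]
  | cons c cs ih =>
      intro pairs cur
      by_cases hc : c = ','
      · subst hc
        have : pvScanStep i (pairs, cur) ','
            = (pairs ++ [(pvStripA cur, i)], []) := by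
          simp [pvScanStep, pvFix_eq]
        simp only [List.cons_append, List.foldl_cons, this, ih]
        simp [pvClean, pvSplit1]
      · by_cases hs : c = '!' ∨ c = '.' ∨ c = '?'
        · have hstep : pvScanStep i (pairs, cur) c = (pairs, cur) := by
            rcases hs with h | h | h <;> subst h <;> simp [pvScanStep]
          have hclean : pvClean (c :: cs) = pvClean cs := by
            rcases hs with h | h | h <;> subst h <;> simp [pvClean]
          simp only [List.cons_append, List.foldl_cons, hstep, ih, hclean]
        · push_neg at hs
          have hstep : pvScanStep i (pairs, cur) c = (pairs, cur ++ [c]) := by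
            simp [pvScanStep, hc, hs.1, hs.2.1, hs.2.2]
          have hclean : pvClean (c :: cs) = c :: pvClean cs := by
            simp [pvClean, hs.1, hs.2.1, hs.2.2]
          simp only [List.cons_append, List.foldl_cons, hstep, ih, hclean]
          simp [pvSplit1, hc]

-- B's stage 1 builds the flat pair list
theorem pairsB_eq (base : List (List (String × String))) : pvPairsB base = pvPairs base := by
  unfold pvPairsB pvPairs
  have hf : (fun (pairs : List (String × Int)) (ip : Int × List (String × String)) =>
      match ip.2.lookup "keywords" with
      | none => pairs
      | some kw => ((kw.toList ++ [',']).foldl (pvScanStep ip.1) (pairs, [])).1)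
      = (fun pairs ip => pairs ++ (match ip.2.lookup "keywords" with
        | none => []
        | some kw => (pvSplit kw).map (fun key => (pvStripA key, ip.1)))) := by
    funext pairs ip
    cases h : ip.2.lookup "keywords" with
    | none => simp
    | some kw =>
        dsimp only
        rw [scan_spec, pvSplit, splitOn_comma]
  rw [hf, PySem.List.foldl_append_eq_flatMap, List.nil_append]

-- A's branchy dict update is the unconditional modify-append step
theorem dict_step_eq (d : PySem.Dict String (List Int)) (k : String) (i : Int) :
    (if d.contains k = false then d.insert k [i] else d.modify k [] (fun v => v ++ [i]))
    = d.modify k [] (fun v => v ++ [i]) := by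
  cases h : d.contains k with
  | false => simp [PySem.Dict.modify, PySem.Dict.getD_of_not_contains d [] h]
  | true => simp

-- A's nested dict loop is the fold of that step over pvPairs
theorem dictA_eq (base : List (List (String × String))) :
    pvDictA base
    = (pvPairs base).foldl (fun d p => d.modify p.1 [] (fun v => v ++ [p.2])) PySem.Dict.empty := by
  unfold pvDictA pvPairs
  rw [List.foldl_flatMap]
  have hf : (fun (d : PySem.Dict String (List Int)) (ip : Int × List (String × String)) =>
      match ip.2.lookup "keywords" with
      | none => d
      | some kw => (pvSplit kw).foldl (fun d key =>
          let k := pvStripA key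
          if d.contains k = false then d.insert k [ip.1]
          else d.modify k [] (fun v => v ++ [ip.1])) d)
      = (fun d ip => (match ip.2.lookup "keywords" with
          | none => ([] : List (String × Int))
          | some kw => (pvSplit kw).map (fun key => (pvStripA key, ip.1))).foldl
            (fun d (p : String × Int) => d.modify p.1 [] (fun v => v ++ [p.2])) d) := by
    funext d ip
    cases h : ip.2.lookup "keywords" with
    | none => simp
    | some kw =>
        simp only [List.foldl_map]
        have hstep : (fun (d : PySem.Dict String (List Int)) (key : List Char) =>
            let k := pvStripA key
            if d.contains k = false then d.insert k [ip.1]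
            else d.modify k [] (fun v => v ++ [ip.1]))
            = (fun d key => d.modify (pvStripA key) [] (fun v => v ++ [ip.1])) := by
          funext d key
          exact dict_step_eq d (pvStripA key) ip.1
        rw [hstep]
  rw [hf]

-- A equals the canonical "sorted distinct keys, filtered indices" form over pvPairs
theorem all_KeyWords_eq_canon (base : List (List (String × String))) :
    all_KeyWords base
    = (PySem.List.sorted (PySem.Set.ofList ((pvPairs base).map (fun p => p.1))) (fun k => k)).map
        (fun k => (k, ((pvPairs base).filter (fun p => p.1 == k)).map (fun p => p.2))) := by
  unfold all_KeyWords
  have hkeys : (pvDictA base).keys = PySem.Set.ofList ((pvPairs base).map (fun p => p.1)) := by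
    rw [dictA_eq,
      PySem.Dict.keys_foldl_modify_key (pvPairs base) (fun p => p.1)
        [] (fun _ p => fun v => v ++ [p.2]) PySem.Dict.empty]
    exact PySem.Set.update_nil_left _
  rw [hkeys]
  refine List.map_congr_left (fun k _ => ?_)
  rw [dictA_eq, PySem.Dict.getD_foldl_modify_append]
  simp [PySem.Dict.getD_empty]

-- filtering one keyword commutes with one stable insertion into a key-sorted list
theorem filter_insertBy (k : String) (x : String × Int) (acc : List (String × Int))
    (h : acc.Pairwise (fun a b => a.1 ≤ b.1)) :
    (PySem.List.insertBy (fun a b => decide (a.1 < b.1)) x acc).filter (fun p => p.1 == k)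
    = acc.filter (fun p => p.1 == k) ++ (if x.1 == k then [x] else []) := by
  induction acc with
  | nil => by_cases hxk : x.1 = k <;> simp [PySem.List.insertBy, hxk]
  | cons y ys ih =>
      rcases List.pairwise_cons.mp h with ⟨hy, hys⟩
      by_cases hlt : x.1 < y.1
      · have hnil : (y :: ys).filter (fun p => p.1 == k) = [] ∨ ¬ (x.1 == k) = true := by
          by_cases hxk : x.1 = k
          · left
            rw [List.filter_eq_nil_iff]
            intro p hp
            have : y.1 ≤ p.1 := by
              rcases hp with _ | hp
              · exact le_refl _
              · exact hy p (by assumption)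
            have : x.1 < p.1 := lt_of_lt_of_le hlt this
            simp only [beq_iff_eq]
            intro hpk
            exact absurd (hxk ▸ hpk ▸ this) (lt_irrefl _)
          · right; simp [hxk]
        rw [PySem.List.insertBy, if_pos (by simpa using hlt)]
        by_cases hxk : x.1 = k
        · rcases hnil with hnil | hnil
          · rw [List.filter_cons, hnil]
            simp [hxk]
          · simp [hxk] at hnil
        · simp only [List.filter_cons]
          simp [hxk]
      · rw [PySem.List.insertBy, if_neg (by simpa using hlt)]
        simp only [List.filter_cons, ih hys]
        by_cases hyk : (y.1 == k) = true <;> simp [hyk]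

-- filtering one keyword commutes with the whole insertion-sort fold
theorem filter_foldl_insertBy (k : String) (l acc : List (String × Int))
    (h : acc.Pairwise (fun a b => a.1 ≤ b.1)) :
    (l.foldl (fun acc x => PySem.List.insertBy (fun a b => decide (a.1 < b.1)) x acc) acc).filter (fun p => p.1 == k)
    = acc.filter (fun p => p.1 == k) ++ l.filter (fun p => p.1 == k) := by
  induction l generalizing acc with
  | nil => simp
  | cons x l ih =>
      rw [List.foldl_cons, ih _ (PySem.List.insertBy_pairwise_le (fun p => p.1) x acc h),
        filter_insertBy k x acc h]
      by_cases hxk : (x.1 == k) = true <;> simp [List.filter_cons, hxk]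

-- filtering one keyword commutes with the stable sort
theorem filter_sorted (k : String) (l : List (String × Int)) :
    (PySem.List.sorted l (fun p => p.1)).filter (fun p => p.1 == k)
    = l.filter (fun p => p.1 == k) := by
  rw [PySem.List.sorted_eq_foldl_insertBy, filter_foldl_insertBy k l [] (by simp)]
  simp

-- the inner while in span form
theorem groupGo_spec (t : List (String × Int)) : ∀ (k : String) (idxs : List Int),
    pvGroupGo k idxs t
    = (k, idxs ++ (t.takeWhile (fun p => p.1 == k)).map (fun p => p.2)) ::
        pvGroup (t.dropWhile (fun p => p.1 == k)) := by
  induction t with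
  | nil => intro k idxs; simp [pvGroupGo, pvGroup]
  | cons x t ih =>
      intro k idxs
      obtain ⟨k', i⟩ := x
      by_cases hk : k' = k
      · subst hk
        rw [pvGroupGo, if_pos (by simp), ih]
        simp [List.takeWhile_cons, List.dropWhile_cons]
      · rw [pvGroupGo, if_neg (by simpa using hk)]
        have ht : List.takeWhile (fun p => p.1 == k) ((k', i) :: t) = [] := by
          simp [List.takeWhile_cons, hk]
        have hd : List.dropWhile (fun p => p.1 == k) ((k', i) :: t) = (k', i) :: t := by
          simp [List.dropWhile_cons, hk]
        rw [ht, hd]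
        simp [pvGroup]

-- every key in the dropWhile suffix of a key-sorted list is strictly above k
theorem dropWhile_keys_gt (k : String) : ∀ (t : List (String × Int)),
    t.Pairwise (fun a b => a.1 ≤ b.1) → (∀ p ∈ t, k ≤ p.1) →
    ∀ p ∈ t.dropWhile (fun q => q.1 == k), k < p.1 := by
  intro t
  induction t with
  | nil => intro _ _ p hp; simp at hp
  | cons a t ih =>
      intro h hle p hp
      rcases List.pairwise_cons.mp h with ⟨ha, ht⟩
      by_cases hak : (a.1 == k) = true
      · rw [List.dropWhile_cons, if_pos hak] at hp
        exact ih ht (fun q hq => hle q (List.mem_cons_of_mem _ hq)) p hp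
      · rw [List.dropWhile_cons, if_neg hak] at hp
        have hka : k < a.1 :=
          lt_of_le_of_ne (hle a (List.mem_cons_self)) (fun hkk => hak (beq_iff_eq.mpr hkk.symm))
        rcases hp with _ | hp
        · exact hka
        · exact lt_of_lt_of_le hka (ha p (by assumption))

-- the grouping pass on a key-sorted list yields the canonical form
theorem group_spec : ∀ (n : Nat) (l : List (String × Int)), l.length ≤ n →
    l.Pairwise (fun a b => a.1 ≤ b.1) →
    pvGroup l
    = (PySem.List.sorted (PySem.Set.ofList (l.map (fun p => p.1))) (fun k => k)).map
        (fun k => (k, (l.filter (fun p => p.1 == k)).map (fun p => p.2))) := by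
  intro n
  induction n with
  | zero =>
      intro l hl _
      have : l = [] := List.length_eq_zero_iff.mp (Nat.le_zero.mp hl)
      subst this
      simp [pvGroup, PySem.Set.ofList, PySem.List.sorted]
  | succ n ih =>
      intro l hl hp
      match l with
      | [] => simp [pvGroup, PySem.Set.ofList, PySem.List.sorted]
      | (k, i) :: t =>
          rcases List.pairwise_cons.mp hp with ⟨hk, ht⟩
          set same := t.takeWhile (fun q => q.1 == k) with hsame
          set rest := t.dropWhile (fun q => q.1 == k) with hrest
          have hsplit : same ++ rest = t := List.takeWhile_append_dropWhile
          have hsame_k : ∀ p ∈ same, p.1 = k := by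
            intro p hp'
            have := List.mem_takeWhile_imp hp'
            simpa using this
          have hrest_gt : ∀ p ∈ rest, k < p.1 :=
            dropWhile_keys_gt k t ht (fun p hp' => hk p hp')
          have hrest_pw : rest.Pairwise (fun a b => a.1 ≤ b.1) :=
            List.Pairwise.sublist (List.dropWhile_sublist _) ht
          have hrest_len : rest.length ≤ n := by
            have h1 : rest.length ≤ t.length := (List.dropWhile_sublist _).length_le
            have h2 : t.length ≤ n := Nat.lt_succ_iff.mp (by simpa using hl)
            omega
          have hIH := ih rest hrest_len hrest_pw
          -- the sorted distinct keys of l are k followed by those of rest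
          set T := PySem.List.sorted (PySem.Set.ofList (rest.map (fun p => p.1))) (fun k => k) with hT
          have hT_mem : ∀ x ∈ T, x ∈ rest.map (fun p => p.1) := by
            intro x hx
            rw [hT, PySem.List.mem_sorted, PySem.Set.mem_ofList] at hx
            exact hx
          have hT_gt : ∀ x ∈ T, k < x := by
            intro x hx
            rcases List.mem_map.mp (hT_mem x hx) with ⟨p, hp', rfl⟩
            exact hrest_gt p hp'
          have hkeys : PySem.List.sorted (PySem.Set.ofList (((k, i) :: t).map (fun p => p.1))) (fun k => k)
              = k :: T := by
            apply PySem.List.sorted_eq_of_perm_of_pairwise_lt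
            · -- (k :: T).Perm (Set.ofList (l.map .1))
              apply (List.perm_ext_iff_of_nodup ?_ (PySem.Set.nodup_ofList _)).mpr
              · intro x
                rw [PySem.Set.mem_ofList]
                constructor
                · intro hx
                  rcases hx with _ | hx
                  · exact List.mem_cons_self
                  · have : x ∈ rest.map (fun p => p.1) := hT_mem x (by assumption)
                    rcases List.mem_map.mp this with ⟨p, hp', rfl⟩
                    exact List.mem_cons_of_mem _ (List.mem_map_of_mem (a := p)
                      (by rw [← hsplit]; exact List.mem_append_right _ hp'))
                · intro hx
                  rcases List.mem_cons.mp hx with hx | hx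
                  · exact hx ▸ List.mem_cons_self
                  · rcases List.mem_map.mp hx with ⟨p, hp', rfl⟩
                    rw [← hsplit] at hp'
                    rcases List.mem_append.mp hp' with hp' | hp'
                    · have : p.1 = k := hsame_k p hp'
                      rw [this]; exact List.mem_cons_self
                    · refine List.mem_cons_of_mem _ ?_
                      rw [hT, PySem.List.mem_sorted, PySem.Set.mem_ofList]
                      exact List.mem_map_of_mem hp'
              · -- (k :: T).Nodup
                refine List.nodup_cons.mpr ⟨?_, ?_⟩
                · intro hkT
                  exact absurd (hT_gt k hkT) (lt_irrefl _)
                · exact ((PySem.List.sorted_perm _ _ _).nodup_iff).mpr (PySem.Set.nodup_ofList _)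
            · -- (k :: T).Pairwise (· < ·)
              refine List.pairwise_cons.mpr ⟨hT_gt, ?_⟩
              rw [hT]
              exact PySem.List.sorted_ofList_pairwise_lt _
          -- head group: the filter of l at k is (k,i) :: same
          have hfilter_k : ((k, i) :: t).filter (fun p => p.1 == k) = (k, i) :: same := by
            rw [List.filter_cons, if_pos (by simp), ← hsplit, List.filter_append]
            have h1 : same.filter (fun p => p.1 == k) = same :=
              List.filter_eq_self.mpr (fun p hp' => by simp [hsame_k p hp'])
            have h2 : rest.filter (fun p => p.1 == k) = [] :=
              List.filter_eq_nil_iff.mpr (fun p hp' => by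
                simp only [beq_iff_eq]
                intro hpk
                exact absurd (hpk ▸ hrest_gt p hp') (lt_irrefl _))
            rw [h1, h2, List.append_nil]
          -- tail groups: the filter of l at k' > k equals the filter of rest
          have hfilter_gt : ∀ k', k < k' →
              ((k, i) :: t).filter (fun p => p.1 == k') = rest.filter (fun p => p.1 == k') := by
            intro k' hk'
            rw [List.filter_cons, if_neg (by
              simp only [beq_iff_eq]
              intro hkk'
              exact absurd (hkk' ▸ hk') (lt_irrefl _)), ← hsplit, List.filter_append]
            have h1 : same.filter (fun p => p.1 == k') = [] :=
              List.filter_eq_nil_iff.mpr (fun p hp' => by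
                simp only [beq_iff_eq, hsame_k p hp']
                intro hkk'
                exact absurd (hkk' ▸ hk') (lt_irrefl _))
            rw [h1, List.nil_append]
          rw [hkeys]
          show pvGroup ((k, i) :: t) = _
          rw [pvGroup, groupGo_spec, ← hsame, ← hrest, hIH]
          rw [List.map_cons]
          congr 1
          · rw [hfilter_k]
            simp
          · refine List.map_congr_left (fun k' hk' => ?_)
            rw [hfilter_gt k' (hT_gt k' hk')]

-- evaluating B's port at the raise witness (String `<` does not kernel-reduce, so the
-- sort step is evaluated through sorted_eq_of_perm_of_pairwise_lt instead of decide)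
theorem alt_at_raise_witness :
    all_KeyWords_alt pvRaiseWitness_all_KeyWords = pvRaiseWitnessOut_all_KeyWords := by
  have h1 : pvPairsB pvRaiseWitness_all_KeyWords
      = [(("ai" : String), (0 : Int)), ("", 0), ("ml", 0)] := by decide
  have h2 : PySem.List.sorted [(("ai" : String), (0 : Int)), ("", 0), ("ml", 0)] (fun p => p.1)
      = [("", 0), ("ai", 0), ("ml", 0)] := by
    apply PySem.List.sorted_eq_of_perm_of_pairwise_lt
    · decide
    · have l1 : ("" : String) < "ai" := by rw [String.lt_iff_toList_lt]; decide
      have l2 : ("" : String) < "ml" := by rw [String.lt_iff_toList_lt]; decide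
      have l3 : ("ai" : String) < "ml" := by rw [String.lt_iff_toList_lt]; decide
      refine List.pairwise_cons.mpr ⟨?_, List.pairwise_cons.mpr ⟨?_,
        List.pairwise_cons.mpr ⟨?_, List.Pairwise.nil⟩⟩⟩
      · intro b hb
        rcases List.mem_cons.mp hb with h | hb
        · rw [h]; exact l1
        · rw [List.mem_singleton.mp hb]; exact l2
      · intro b hb
        rw [List.mem_singleton.mp hb]; exact l3
      · intro b hb
        simp at hb
  show pvGroup (PySem.List.sorted (pvPairsB pvRaiseWitness_all_KeyWords) (fun p => p.1)) = _
  rw [h1, h2]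
  decide


-- ===== VERDICT (by name: the statement is the Claim_ definition above) =====
theorem all_KeyWords_spec : Claim_equal_all_KeyWords := by
  intro base _ _
  unfold Spec_all_KeyWords all_KeyWords_alt
  rw [pairsB_eq, all_KeyWords_eq_canon]
  set s := PySem.List.sorted (pvPairs base) (fun p => p.1) with hs
  rw [group_spec s.length s (le_refl _) (by rw [hs]; exact PySem.List.sorted_pairwise _ _)]
  have hperm : (PySem.Set.ofList (s.map (fun p => p.1))).Perm
      (PySem.Set.ofList ((pvPairs base).map (fun p => p.1))) := by
    apply (List.perm_ext_iff_of_nodup (PySem.Set.nodup_ofList _) (PySem.Set.nodup_ofList _)).mpr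
    intro x
    rw [PySem.Set.mem_ofList, PySem.Set.mem_ofList]
    constructor
    · intro hx
      rcases List.mem_map.mp hx with ⟨p, hp, rfl⟩
      exact List.mem_map_of_mem ((PySem.List.mem_sorted _ _ _ _).mp hp)
    · intro hx
      rcases List.mem_map.mp hx with ⟨p, hp, rfl⟩
      exact List.mem_map_of_mem ((PySem.List.mem_sorted _ _ _ _).mpr hp)
  rw [PySem.List.sorted_eq_sorted_of_perm _ _ _ (fun a b h => h) hperm]
  refine (List.map_congr_left (fun k _ => ?_)).symm
  rw [hs, filter_sorted]

@[simp] theorem all_KeyWords_raises : Claim_raises_all_KeyWords := by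
  unfold Claim_raises_all_KeyWords
  constructor
  · intro base _ hr hp
    unfold Raises_all_KeyWords at hr
    unfold Pre_all_KeyWords at hp
    rw [List.any_eq_true] at hr
    rw [List.all_eq_true] at hp
    rcases hr with ⟨pub, hmem, hP⟩
    have := hp pub hmem
    cases h : pub.lookup "keywords" with
    | none => rw [h] at hP; simp at hP
    | some kw => rw [h] at hP this; simp at hP this; exact absurd hP this
  · exact ⟨by decide, by decide, alt_at_raise_witness⟩
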